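-- pv_equiv track=rewrite | github.com/amha-kindu/text-generation | dataset.py | _even_splits
-- ===== SOURCE A (Python) =====
-- def _even_splits(n: int, k: int):
--     base, rem = divmod(n, k)
--     splits, start = [], 0
--     for i in range(k):
--         end = start + base + (1 if i < rem else 0)
--         splits.append((start, end))
--         start = end
--     return splits
-- ===== SOURCE B (Python) =====
-- def _even_splits(n: int, k: int):
--     base, rem = divmod(n, k)
--     def boundary(i):
--         return i * base + min(i, rem)
--     return [(boundary(i), boundary(i + 1)) for i in range(k)]
-- ===== Notes on version B (the rewrite author's own statement) =====
-- stated objective: alternative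
-- what changed: Replaces the accumulator loop (running 'start' threaded between iterations) with a closed-form boundary function boundary(i) = i*base + min(i, rem), so each pair is computed independently from its index.
import Mathlib
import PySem

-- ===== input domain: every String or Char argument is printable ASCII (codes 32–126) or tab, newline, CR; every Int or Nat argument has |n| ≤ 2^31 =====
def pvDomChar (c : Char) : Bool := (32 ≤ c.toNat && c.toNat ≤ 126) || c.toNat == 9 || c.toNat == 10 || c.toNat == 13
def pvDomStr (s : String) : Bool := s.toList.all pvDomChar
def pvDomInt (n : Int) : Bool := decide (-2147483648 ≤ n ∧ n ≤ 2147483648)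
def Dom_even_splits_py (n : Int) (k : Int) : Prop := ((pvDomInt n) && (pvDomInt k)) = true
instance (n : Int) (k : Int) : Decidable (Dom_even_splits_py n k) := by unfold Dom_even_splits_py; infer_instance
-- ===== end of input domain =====

-- B replaces A's accumulator loop by a closed-form boundary function (each pair computed
-- independently from its index); objective: alternative decomposition, same cost.


-- ===== PORT A =====
-- literal port of A: divmod, then a fold over range(k) threading (splits, start)
def even_splits_py (n : Int) (k : Int) : List (Int × Int) :=
  let base := PySem.Int.floordiv n k
  let rem := PySem.Int.mod n k
  let st := (PySem.List.pyRange 0 k 1).foldl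
    (fun (st : List (Int × Int) × Int) i =>
      let e := st.2 + base + (if i < rem then (1 : Int) else 0)
      (st.1 ++ [(st.2, e)], e)) ([], 0)
  st.1

-- ===== PORT B =====
-- port of B: closed-form boundary(i) = i*base + min i rem, each pair from its index
def even_splits_py_alt (n : Int) (k : Int) : List (Int × Int) :=
  let base := PySem.Int.floordiv n k
  let rem := PySem.Int.mod n k
  (PySem.List.pyRange 0 k 1).map
    (fun i => (i * base + min i rem, (i + 1) * base + min (i + 1) rem))

-- ===== PRECONDITION & SPEC =====
-- Pre_ excludes only k = 0, where Python's divmod raises ZeroDivisionError.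
def Pre_even_splits_py (n : Int) (k : Int) : Prop := k ≠ 0
instance (n : Int) (k : Int) : Decidable (Pre_even_splits_py n k) := by unfold Pre_even_splits_py; infer_instance
def pvWitness_even_splits_py : Int × Int := (7, 3)
def Spec_even_splits_py (n : Int) (k : Int) (out : List (Int × Int)) : Prop := out = even_splits_py_alt n k
instance (n : Int) (k : Int) (out : List (Int × Int)) : Decidable (Spec_even_splits_py n k out) := by unfold Spec_even_splits_py; infer_instance

-- ===== CLAIM (what is proved, stated in full; the proofs are below) =====
def Claim_equal_even_splits_py : Prop := ∀ (n : Int) (k : Int), Dom_even_splits_py n k → Pre_even_splits_py n k → Spec_even_splits_py n k (even_splits_py n k)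

-- ===== LEMMAS AND PROOFS =====

-- A's fold over range(0, m) produces exactly B's closed-form pairs, with final start = boundary m.
lemma even_splits_fold_lemma (base rem : Int) (hrem : 0 ≤ rem) : ∀ (m : Nat),
    ((PySem.List.pyRange 0 (m : Int) 1).foldl
      (fun (st : List (Int × Int) × Int) i =>
        (st.1 ++ [(st.2, st.2 + base + (if i < rem then (1 : Int) else 0))],
         st.2 + base + (if i < rem then (1 : Int) else 0))) ([], 0))
    = ((PySem.List.pyRange 0 (m : Int) 1).map
        (fun i => (i * base + min i rem, (i + 1) * base + min (i + 1) rem)),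
       (m : Int) * base + min (m : Int) rem) := by
  intro m
  induction m with
  | zero =>
      rw [PySem.List.pyRange_one_eq_nil (by omega)]
      simp
      omega
  | succ m ih =>
      have hcast : ((m + 1 : Nat) : Int) = (m : Int) + 1 := by push_cast; ring
      rw [hcast, PySem.List.pyRange_one_succ_right (by positivity),
        List.foldl_append, ih, List.map_append]
      simp only [List.foldl_cons, List.foldl_nil, List.map_cons, List.map_nil]
      simp only [add_one_mul, Prod.mk.injEq]
      generalize (m : Int) * base = c
      constructor
      · congr 1
        simp only [List.cons.injEq, Prod.mk.injEq, and_true]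
        exact ⟨trivial, by split_ifs <;> omega⟩
      · split_ifs <;> omega

theorem even_splits_py_spec_aux (n k : Int) (hk : k ≠ 0) :
    even_splits_py n k = even_splits_py_alt n k := by
  simp only [even_splits_py, even_splits_py_alt]
  by_cases hkp : 0 < k
  · have hrem : 0 ≤ PySem.Int.mod n k := by
      rw [PySem.Int.mod_eq_emod_of_pos hkp]
      exact Int.emod_nonneg n hk
    have hk2 : ((k.toNat : Int)) = k := Int.toNat_of_nonneg (by omega)
    rw [← hk2] at hrem ⊢
    rw [even_splits_fold_lemma (PySem.Int.floordiv n (k.toNat : Int))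
      (PySem.Int.mod n (k.toNat : Int)) hrem k.toNat]
  · rw [PySem.List.pyRange_one_eq_nil (by omega)]
    simp

-- ===== VERDICT (by name: the statement is the Claim_ definition above) =====
theorem even_splits_py_spec : Claim_equal_even_splits_py := by
  intro n k _ hk
  exact even_splits_py_spec_aux n k hk
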